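-- pv_equiv track=rewrite | github.com/ThiiagoAC7/comp-viz-study | class-01/flip_the_sign.py | check_sequence_neg_pos
-- ===== SOURCE A (Python) =====
-- def check_sequence_neg_pos(num_sequence):
--     '''
--     Validating sequence if is +,-,+,-,+,...
--     considering each number as 1 or -1,
--         if current sum is greater than 2 or less than -2
--         sequence is on the wrong order
--     '''
--     curr_sum = 0
--     result = True
--
--     for i in num_sequence:
--         if result:
--             _aux = -1
--             if (i > 0):
--                 _aux = 1
--             curr_sum = curr_sum+ _aux
--             if (curr_sum > 1 or curr_sum < -1):
--                 result = False
--
--     return result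
-- ===== SOURCE B (Python) =====
-- def check_sequence_neg_pos(num_sequence):
--     it = iter(num_sequence)
--     for x in it:
--         y = next(it, None)
--         if y is None:
--             return True
--         if (x > 0) == (y > 0):
--             return False
--     return True
-- ===== Notes on version B (the rewrite author's own statement) =====
-- stated objective: simpler
-- what changed: Replaces A's running-sum automaton with a sticky failure flag by a direct one-pass check that each consecutive pair (e[2j], e[2j+1]) contains differing signs, returning False at the first bad pair.
import Mathlib
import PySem

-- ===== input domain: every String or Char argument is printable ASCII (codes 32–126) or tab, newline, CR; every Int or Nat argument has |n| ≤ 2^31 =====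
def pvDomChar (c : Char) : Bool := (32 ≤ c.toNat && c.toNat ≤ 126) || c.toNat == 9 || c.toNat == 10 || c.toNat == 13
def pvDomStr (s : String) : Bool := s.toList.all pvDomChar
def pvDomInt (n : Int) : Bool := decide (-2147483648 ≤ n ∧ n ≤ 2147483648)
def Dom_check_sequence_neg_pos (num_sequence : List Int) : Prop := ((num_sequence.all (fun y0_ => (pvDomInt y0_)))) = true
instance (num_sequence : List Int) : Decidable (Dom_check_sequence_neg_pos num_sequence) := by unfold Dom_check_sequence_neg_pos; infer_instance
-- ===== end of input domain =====

-- B replaces A's running-sum-with-sticky-flag automaton by a direct check that each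
-- consecutive pair (e[2j], e[2j+1]) has differing signs (objective: simpler).

-- ===== PORT A =====
-- one loop iteration of A: state = (curr_sum, result)
def pvStepA (st : Int × Bool) (i : Int) : Int × Bool :=
  if st.2 then
    let _aux : Int := if i > 0 then 1 else -1
    let curr_sum := st.1 + _aux
    (curr_sum, if curr_sum > 1 ∨ curr_sum < -1 then false else st.2)
  else st

def check_sequence_neg_pos (num_sequence : List Int) : Bool :=
  (num_sequence.foldl pvStepA (0, true)).2

-- ===== PORT B =====
def check_sequence_neg_pos_alt (num_sequence : List Int) : Bool :=
  match num_sequence with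
  | x :: y :: rest =>
    if (decide (x > 0)) == (decide (y > 0)) then false
    else check_sequence_neg_pos_alt rest
  | _ => true

-- ===== PRECONDITION & SPEC =====
def Spec_check_sequence_neg_pos (num_sequence : List Int) (out : Bool) : Prop := out = check_sequence_neg_pos_alt num_sequence
instance (num_sequence : List Int) (out : Bool) : Decidable (Spec_check_sequence_neg_pos num_sequence out) := by unfold Spec_check_sequence_neg_pos; infer_instance

-- ===== CLAIM (what is proved, stated in full; the proofs are below) =====
def Claim_equal_check_sequence_neg_pos : Prop := ∀ (num_sequence : List Int), Dom_check_sequence_neg_pos num_sequence → Spec_check_sequence_neg_pos num_sequence (check_sequence_neg_pos num_sequence)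

-- ===== LEMMAS AND PROOFS =====

-- once A's flag is false, the fold keeps the state unchanged
theorem pvFoldA_false (l : List Int) (s : Int) :
    List.foldl pvStepA (s, false) l = (s, false) := by
  induction l with
  | nil => rfl
  | cons x xs ih => simpa [pvStepA] using ih

-- core: A's fold from the reset state (0, true) matches B's pair recursion
theorem pvMain : ∀ (l : List Int),
    (List.foldl pvStepA (0, true) l).2 = check_sequence_neg_pos_alt l
  | [] => rfl
  | [x] => by
    simp only [List.foldl, pvStepA, check_sequence_neg_pos_alt]
    split_ifs <;> simp_all
  | x :: y :: rest => by
    have ih := pvMain rest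
    simp only [List.foldl]
    by_cases hx : x > 0 <;> by_cases hy : y > 0 <;>
      simp only [pvStepA, hx, hy, if_pos, check_sequence_neg_pos_alt] <;>
      norm_num <;>
      simp only [pvFoldA_false, ih]
  termination_by l => l.length

-- ===== VERDICT (by name: the statement is the Claim_ definition above) =====
theorem check_sequence_neg_pos_spec : Claim_equal_check_sequence_neg_pos := by
  intro l _
  unfold Spec_check_sequence_neg_pos check_sequence_neg_pos
  exact pvMain l
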